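-- pv_equiv track=rewrite | github.com/swarmauri/swarmauri-sdk | test.py | maxScore
-- ===== SOURCE A (Python) =====
-- from typing import List
--
-- def maxScore(nums: List[int], weights: List[int], r: int, p: int) -> int:
--     # 1. Invalid inputs
--     n = len(nums)
--     if n != len(weights) or r < 0 or p < 0:
--         return -1
--
--     # 2. Collect all positive weights
--     pos = [w for w in weights if w > 0]
--     if not pos:
--         return 0  # no positive gain possible
--
--     # 3. Sum of single uses
--     sum1 = sum(pos)
--
--     # 4. We can double-count at most r of them
--     reuse_count = min(r, len(pos))
--     # pick the largest 'reuse_count' weights to reuse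
--     pos.sort(reverse=True)
--     sum2 = sum(pos[:reuse_count])
--
--     # 5. Total maximum score
--     return sum1 + sum2
-- ===== SOURCE B (Python) =====
-- def _top_sum(k, xs):
--     # iterative quickselect-style partitioning: sum of the k largest elements of xs
--     acc = 0
--     while k > 0 and xs:
--         v = xs[len(xs) // 2]
--         hi = [y for y in xs if y > v]
--         if k <= len(hi):
--             xs = hi
--             continue
--         lo = [y for y in xs if y < v]
--         eq = len(xs) - len(hi) - len(lo)
--         take = k - len(hi)
--         if take > eq:
--             take = eq
--         acc += sum(hi) + take * v
--         k -= len(hi) + take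
--         xs = lo
--     return acc
--
-- def maxScore(nums, weights, r, p):
--     if len(nums) != len(weights) or r < 0 or p < 0:
--         return -1
--     total = 0
--     pos = []
--     for w in weights:
--         if w > 0:
--             total += w
--             pos.append(w)
--     if not pos:
--         return 0
--     k = r if r < len(pos) else len(pos)
--     return total + _top_sum(k, pos)
-- ===== Notes on version B (the rewrite author's own statement) =====
-- stated objective: alternative
-- what changed: B replaces A's full descending sort plus slice with a single accumulating pass over weights and an iterative quickselect-style three-way-partition loop (middle-element pivot) that sums the r largest positive weights without sorting; measured wall-clock is comparable to A's C-implemented sort.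
import Mathlib
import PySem

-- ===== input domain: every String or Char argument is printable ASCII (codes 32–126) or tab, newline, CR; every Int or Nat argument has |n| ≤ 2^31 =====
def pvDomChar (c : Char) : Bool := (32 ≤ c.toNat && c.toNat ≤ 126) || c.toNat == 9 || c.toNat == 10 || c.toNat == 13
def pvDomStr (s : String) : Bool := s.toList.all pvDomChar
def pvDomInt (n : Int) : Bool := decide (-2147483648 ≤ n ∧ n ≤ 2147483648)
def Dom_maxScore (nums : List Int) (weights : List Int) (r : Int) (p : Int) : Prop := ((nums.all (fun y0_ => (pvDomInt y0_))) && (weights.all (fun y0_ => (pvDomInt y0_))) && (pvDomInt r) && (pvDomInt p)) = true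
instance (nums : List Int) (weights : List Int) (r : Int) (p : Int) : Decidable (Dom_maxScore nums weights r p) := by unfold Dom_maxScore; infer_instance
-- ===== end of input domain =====

-- B avoids A's full descending sort: one accumulating pass over the weights plus an iterative
-- quickselect-style partition loop summing the r largest positive weights (alternative algorithm).


-- ===== PORT A =====
def maxScore (nums : List Int) (weights : List Int) (r : Int) (p : Int) : Int :=
  let n : Int := nums.length
  if n ≠ (weights.length : Int) ∨ r < 0 ∨ p < 0 then -1
  else
    let pos := weights.filter (fun w => decide (0 < w))
    if pos = [] then 0
    else
      let sum1 := pos.sum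
      let reuseCount := min r (pos.length : Int)
      let posSorted := PySem.List.sorted pos (fun x => x) true
      let sum2 := (PySem.List.slice posSorted none (some reuseCount)).sum
      sum1 + sum2

-- ===== PORT B =====
-- the while-loop of Source B's _top_sum, state (k, xs, acc); xs[len(xs)//2] is ported as
-- List.getD (xs.length / 2) 0, exact because the index is always in range for nonempty xs
def topSumLoop (k : Nat) (xs : List Int) (acc : Int) : Int :=
  if k = 0 ∨ xs = [] then acc
  else
    let v := xs.getD (xs.length / 2) 0
    let hi := xs.filter (fun y => decide (v < y))
    if k ≤ hi.length then topSumLoop k hi acc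
    else
      let lo := xs.filter (fun y => decide (y < v))
      let eqn := xs.length - hi.length - lo.length
      let tk := min (k - hi.length) eqn
      topSumLoop (k - (hi.length + tk)) lo (acc + hi.sum + (tk : Int) * v)
termination_by xs.length
decreasing_by
  all_goals
    simp only [List.length_unattach]
    have hne : xs ≠ [] := by tauto
    have hlt : xs.length / 2 < xs.length :=
      Nat.div_lt_of_lt_mul (by cases xs <;> simp_all)
    have hv : xs.getD (xs.length / 2) 0 ∈ xs := by
      rw [List.getD_eq_getElem xs 0 hlt]; exact List.getElem_mem hlt
    calc _ < xs.attach.length :=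
          (List.length_filter_lt_length_iff_exists).mpr ⟨⟨_, hv⟩, List.mem_attach _ _, by simp⟩
      _ = xs.length := List.length_attach

def topSum (k : Nat) (xs : List Int) : Int := topSumLoop k xs 0

def maxScore_alt (nums : List Int) (weights : List Int) (r : Int) (p : Int) : Int :=
  if (nums.length : Int) ≠ (weights.length : Int) ∨ r < 0 ∨ p < 0 then -1
  else
    let acc := weights.foldl
      (fun (acc : Int × List Int) w => if 0 < w then (acc.1 + w, acc.2 ++ [w]) else acc) (0, [])
    let total := acc.1
    let pos := acc.2
    if pos = [] then 0
    else
      let k : Int := if r < (pos.length : Int) then r else (pos.length : Int)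
      total + topSum k.toNat pos

-- ===== PRECONDITION & SPEC =====
def Spec_maxScore (nums : List Int) (weights : List Int) (r : Int) (p : Int) (out : Int) : Prop := out = maxScore_alt nums weights r p
instance (nums : List Int) (weights : List Int) (r : Int) (p : Int) (out : Int) : Decidable (Spec_maxScore nums weights r p out) := by unfold Spec_maxScore; infer_instance

-- ===== CLAIM (what is proved, stated in full; the proofs are below) =====
def Claim_equal_maxScore : Prop := ∀ (nums : List Int) (weights : List Int) (r : Int) (p : Int), Dom_maxScore nums weights r p → Spec_maxScore nums weights r p (maxScore nums weights r p)

-- ===== LEMMAS AND PROOFS =====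

-- B's accumulating pass computes (sum of positives, list of positives).
theorem foldl_pos_pair (ws : List Int) (t : Int) (l : List Int) :
    ws.foldl (fun (acc : Int × List Int) w => if 0 < w then (acc.1 + w, acc.2 ++ [w]) else acc) (t, l)
      = (t + (ws.filter (fun w => decide (0 < w))).sum, l ++ ws.filter (fun w => decide (0 < w))) := by
  induction ws generalizing t l with
  | nil => simp
  | cons w ws ih =>
    by_cases h : 0 < w <;> simp [h, ih, add_assoc]

-- zeta-expanded unfolding of topSumLoop in the running case
theorem topSumLoop_run (k : Nat) (xs : List Int) (acc : Int) (h : ¬(k = 0 ∨ xs = [])) :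
    topSumLoop k xs acc
      = if k ≤ (xs.filter (fun y => decide (xs.getD (xs.length / 2) 0 < y))).length then
          topSumLoop k (xs.filter (fun y => decide (xs.getD (xs.length / 2) 0 < y))) acc
        else
          topSumLoop
            (k - ((xs.filter (fun y => decide (xs.getD (xs.length / 2) 0 < y))).length
              + min (k - (xs.filter (fun y => decide (xs.getD (xs.length / 2) 0 < y))).length)
                  (xs.length - (xs.filter (fun y => decide (xs.getD (xs.length / 2) 0 < y))).length
                    - (xs.filter (fun y => decide (y < xs.getD (xs.length / 2) 0))).length)))
            (xs.filter (fun y => decide (y < xs.getD (xs.length / 2) 0)))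
            (acc + (xs.filter (fun y => decide (xs.getD (xs.length / 2) 0 < y))).sum
              + ((min (k - (xs.filter (fun y => decide (xs.getD (xs.length / 2) 0 < y))).length)
                  (xs.length - (xs.filter (fun y => decide (xs.getD (xs.length / 2) 0 < y))).length
                    - (xs.filter (fun y => decide (y < xs.getD (xs.length / 2) 0))).length) : Nat) : Int)
                * xs.getD (xs.length / 2) 0) := by
  rw [topSumLoop, if_neg h]

-- xs splits as (elements > v) ++ (copies of v) ++ (elements < v), each part sorted descending
theorem sortDesc_decomp (v : Int) (xs : List Int) :
    PySem.List.sorted xs (fun y => y) true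
      = PySem.List.sorted (xs.filter (fun y => decide (v < y))) (fun y => y) true
        ++ List.replicate (xs.count v) v
        ++ PySem.List.sorted (xs.filter (fun y => decide (y < v))) (fun y => y) true := by
  have hmid : xs.filter (fun y => y == v) = List.replicate (xs.count v) v := List.filter_beq v
  have hperm : (xs.filter (fun y => decide (v < y))
      ++ (List.replicate (xs.count v) v ++ xs.filter (fun y => decide (y < v)))).Perm xs := by
    refine List.Perm.trans ?_ (List.filter_append_perm (fun y => decide (v < y)) xs)
    refine List.Perm.append_left _ ?_
    rw [← hmid]
    have h1 : (xs.filter (fun y => !decide (v < y))).filter (fun y => y == v)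
        = xs.filter (fun y => y == v) := by
      rw [List.filter_filter]
      refine List.filter_congr (fun y _ => ?_)
      by_cases h : y = v <;> simp [h]
    have h2 : (xs.filter (fun y => !decide (v < y))).filter (fun y => !(y == v))
        = xs.filter (fun y => decide (y < v)) := by
      rw [List.filter_filter]
      refine List.filter_congr (fun y _ => ?_)
      by_cases h : y = v
      · simp [h]
      · by_cases h' : y < v <;> simp [h, h'] <;> omega
    refine List.Perm.trans (l₂ := (xs.filter (fun y => !decide (v < y))).filter (fun y => y == v)
        ++ (xs.filter (fun y => !decide (v < y))).filter (fun y => !(y == v))) ?_ ?_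
    · rw [h1, h2]
    · exact List.filter_append_perm (fun y => y == v) (xs.filter (fun y => !decide (v < y)))
  have hmemhi : ∀ y ∈ xs.filter (fun y => decide (v < y)), v < y := by
    intro y hy; have := (List.mem_filter.mp hy).2; simpa using this
  have hmemlo : ∀ y ∈ xs.filter (fun y => decide (y < v)), y < v := by
    intro y hy; have := (List.mem_filter.mp hy).2; simpa using this
  apply PySem.List.eq_of_perm_of_pairwise_le_of_injective (fun y : Int => -y) neg_injective
  · -- permutation
    refine (PySem.List.sorted_perm _ _ _).trans (List.Perm.symm ?_)
    rw [List.append_assoc]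
    exact (List.Perm.append (PySem.List.sorted_perm _ _ _)
      (List.Perm.append_left _ (PySem.List.sorted_perm _ _ _))).trans hperm
  · exact (PySem.List.sorted_pairwise_rev _ _).imp (fun h => by omega)
  · -- pairwise descending on the decomposed list, transported through negation
    refine List.Pairwise.imp (R := fun a b : Int => b ≤ a) (fun h => by omega) ?_
    rw [List.append_assoc, List.pairwise_append]
    refine ⟨PySem.List.sorted_pairwise_rev _ _, ?_, ?_⟩
    · rw [List.pairwise_append]
      refine ⟨List.pairwise_replicate.mpr (Or.inr le_rfl), ?_, ?_⟩
      · exact PySem.List.sorted_pairwise_rev _ _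
      · intro a ha b hb
        have hav : a = v := (List.mem_replicate.mp ha).2
        have hbv : b < v := hmemlo b ((PySem.List.mem_sorted _ _ _ _).mp hb)
        omega
    · intro a ha b hb
      have hva : v < a := hmemhi a ((PySem.List.mem_sorted _ _ _ _).mp ha)
      rcases List.mem_append.mp hb with hb | hb
      · have : b = v := (List.mem_replicate.mp hb).2
        omega
      · have : b < v := hmemlo b ((PySem.List.mem_sorted _ _ _ _).mp hb)
        omega

-- sum of the first k of A ++ replicate c mid ++ B, when A fits entirely
theorem sum_take_append3 (A : List Int) (mid : Int) (c : Nat) (B : List Int) (k : Nat)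
    (h : A.length ≤ k) :
    ((A ++ (List.replicate c mid ++ B)).take k).sum
      = A.sum + ((min (k - A.length) c : Nat) : Int) * mid + ((B.take (k - A.length - c)).sum) := by
  rw [List.take_append, List.take_of_length_le h, List.take_append, List.take_replicate,
    List.length_replicate]
  simp [List.sum_append, List.sum_replicate, add_assoc]

-- loop invariant: the quickselect loop adds the sum of the first k of the descending sort
theorem topSumLoop_eq_aux (n : Nat) : ∀ (xs : List Int), xs.length ≤ n → ∀ (k : Nat) (acc : Int),
    topSumLoop k xs acc = acc + ((PySem.List.sorted xs (fun y => y) true).take k).sum := by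
  induction n with
  | zero =>
    intro xs hxs k acc
    have : xs = [] := List.length_eq_zero_iff.mp (Nat.le_zero.mp hxs)
    subst this
    rw [topSumLoop]
    simp [PySem.List.sorted]
  | succ n ih =>
    intro xs hxs k acc
    by_cases h : k = 0 ∨ xs = []
    · rw [topSumLoop, if_pos h]
      rcases h with h | h <;> simp [h, PySem.List.sorted]
    · rw [topSumLoop_run k xs acc h]
      have hne : xs ≠ [] := by tauto
      have hlt : xs.length / 2 < xs.length :=
        Nat.div_lt_of_lt_mul (by cases xs <;> simp_all)
      have hv : xs.getD (xs.length / 2) 0 ∈ xs := by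
        rw [List.getD_eq_getElem xs 0 hlt]; exact List.getElem_mem hlt
      set v := xs.getD (xs.length / 2) 0 with hvdef
      have hhilt : (xs.filter (fun y => decide (v < y))).length < xs.length :=
        (List.length_filter_lt_length_iff_exists).mpr ⟨v, hv, by simp⟩
      have hlolt : (xs.filter (fun y => decide (y < v))).length < xs.length :=
        (List.length_filter_lt_length_iff_exists).mpr ⟨v, hv, by simp⟩
      have hxn : xs.length ≤ n + 1 := hxs
      rw [sortDesc_decomp v xs]
      have hlenS : (PySem.List.sorted (xs.filter (fun y => decide (v < y))) (fun y => y) true).length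
          = (xs.filter (fun y => decide (v < y))).length := PySem.List.length_sorted _ _ _
      -- total length identity: |xs| = |hi| + count v + |lo|
      have hlentot : xs.length = (xs.filter (fun y => decide (v < y))).length
          + xs.count v + (xs.filter (fun y => decide (y < v))).length := by
        have h' := congrArg List.length (sortDesc_decomp v xs)
        simp only [List.length_append, List.length_replicate, PySem.List.length_sorted] at h'
        omega
      by_cases hkhi : k ≤ (xs.filter (fun y => decide (v < y))).length
      · rw [if_pos hkhi, ih _ (by omega) k acc, List.append_assoc,
          List.take_append_of_le_length (by rw [hlenS]; exact hkhi)]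
      · rw [if_neg hkhi, ih _ (by omega), List.append_assoc,
          sum_take_append3 _ _ _ _ k (by rw [hlenS]; omega), hlenS,
          (PySem.List.sorted_perm (xs.filter (fun y => decide (v < y))) (fun y => y) true).sum_eq]
        have htk : min (k - (xs.filter (fun y => decide (v < y))).length) (xs.count v)
            = min (k - (xs.filter (fun y => decide (v < y))).length)
                (xs.length - (xs.filter (fun y => decide (v < y))).length
                  - (xs.filter (fun y => decide (y < v))).length) := by omega
        have hidx : k - (xs.filter (fun y => decide (v < y))).length - xs.count v
            = k - ((xs.filter (fun y => decide (v < y))).length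
                + min (k - (xs.filter (fun y => decide (v < y))).length)
                    (xs.length - (xs.filter (fun y => decide (v < y))).length
                      - (xs.filter (fun y => decide (y < v))).length)) := by omega
        rw [htk, hidx]
        ring

theorem topSum_eq (xs : List Int) (k : Nat) :
    topSum k xs = ((PySem.List.sorted xs (fun y => y) true).take k).sum := by
  unfold topSum
  rw [topSumLoop_eq_aux xs.length xs le_rfl k 0, zero_add]

-- ===== VERDICT (by name: the statement is the Claim_ definition above) =====
theorem maxScore_spec : Claim_equal_maxScore := by
  intro nums weights r p _
  unfold Spec_maxScore maxScore maxScore_alt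
  by_cases hg : (nums.length : Int) ≠ (weights.length : Int) ∨ r < 0 ∨ p < 0
  · rw [if_pos hg, if_pos hg]
  · rw [if_neg hg, if_neg hg]
    simp only [foldl_pos_pair, List.nil_append]
    set pos := weights.filter (fun w => decide (0 < w)) with hpos
    by_cases hn : pos = []
    · rw [if_pos hn, if_pos hn]
    · rw [if_neg hn, if_neg hn]
      have hr : 0 ≤ r := le_of_not_gt (fun h => hg (Or.inr (Or.inl h)))
      have hmin : min r (pos.length : Int) = if r < (pos.length : Int) then r else (pos.length : Int) := by
        rcases lt_or_ge r (pos.length : Int) with h | h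
        · simp [h, min_eq_left (le_of_lt h)]
        · simp [not_lt.mpr h, min_eq_right h]
      have hk : 0 ≤ min r (pos.length : Int) := le_min hr (by positivity)
      rw [topSum_eq, ← hmin, PySem.List.slice_to _ hk]
      ring
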